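-- pv_equiv track=rewrite | github.com/wrangleworks/WranglesPY | wrangles/generate.py | _stringify_query
-- ===== SOURCE A (Python) =====
-- from typing import Any, Dict, List, Literal, Union, Optional, Tuple
--
-- def _stringify_query(record: Any) -> str:
--
--     if isinstance(record, dict):
--         return " ".join(str(v) for v in record.values() if v not in (None, ""))
--     if isinstance(record, list):
--         return " ".join(str(v) for v in record if v not in (None, ""))
--     if record in (None, ""):
--         return ""
--     return str(record)
-- ===== SOURCE B (Python) =====
-- def _join_dc(values):
--     # divide and conquer: join each half, then merge the two joined halves
--     n = len(values)
--     if n == 0: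
--         return ""
--     if n == 1:
--         v = values[0]
--         return "" if v in (None, "") else str(v)
--     mid = n // 2
--     left = _join_dc(values[:mid])
--     right = _join_dc(values[mid:])
--     if left == "":
--         return right
--     if right == "":
--         return left
--     return left + " " + right
--
-- def _stringify_query(record):
--     if isinstance(record, dict):
--         values = list(record.values())
--     elif isinstance(record, list):
--         values = list(record)
--     else:
--         values = [record]
--     return _join_dc(values)
-- ===== Notes on version B (the rewrite author's own statement) =====
-- stated objective: alternative
-- what changed: B normalizes dict/list/scalar to one values list and joins it by divide and conquer: recursively join the two halves and merge them with a single space (dropping an empty side), replacing A's three forward generator-filter-and-join branches.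
import Mathlib
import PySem

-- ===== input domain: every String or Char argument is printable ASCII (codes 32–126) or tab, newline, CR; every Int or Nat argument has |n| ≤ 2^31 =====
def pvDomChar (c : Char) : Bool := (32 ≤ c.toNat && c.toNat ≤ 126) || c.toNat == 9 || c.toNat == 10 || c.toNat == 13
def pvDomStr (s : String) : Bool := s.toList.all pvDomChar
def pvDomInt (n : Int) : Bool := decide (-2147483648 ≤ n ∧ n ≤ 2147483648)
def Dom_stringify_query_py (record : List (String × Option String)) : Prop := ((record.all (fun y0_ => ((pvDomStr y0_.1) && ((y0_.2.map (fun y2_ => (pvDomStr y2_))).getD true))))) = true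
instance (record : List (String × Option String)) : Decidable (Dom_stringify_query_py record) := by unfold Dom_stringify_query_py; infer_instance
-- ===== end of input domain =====

-- B normalizes to one values list and joins it by divide and conquer (join halves, merge with a space),
-- replacing A's three forward filter-and-join branches; objective: alternative (same task, different algorithm).
-- (On the Lean side record is always the dict case, so only that branch of each Python is exercised.)

-- ===== PORT A =====
-- A's generator filter 'if v not in (None, "")': None and "" are dropped, everything else kept.
def pvKeep (v : Option String) : Option String :=
  match v with
  | none => none
  | some s => if s = "" then none else some s

-- A (dict branch): " ".join(str(v) for v in record.values() if v not in (None, "")) —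
-- the generator is the filterMap with pvKeep, then one join.
def stringify_query_py (record : List (String × Option String)) : String :=
  PySem.Str.join " " ((record.map Prod.snd).filterMap pvKeep)

-- ===== PORT B =====
-- B's helper _join_dc: split at the midpoint, join each half recursively, merge the halves.
def pvJoinDC (vs : List (Option String)) : String :=
  match vs with
  | [] => ""
  | [v] => (match v with | none => "" | some s => if s = "" then "" else s)
  | v1 :: v2 :: rest =>
    let l := v1 :: v2 :: rest
    let mid := l.length / 2
    let left := pvJoinDC (l.take mid)
    let right := pvJoinDC (l.drop mid)
    if left = "" then right
    else if right = "" then left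
    else left ++ " " ++ right
termination_by vs.length
decreasing_by
  · simp; omega
  · simp; omega

def stringify_query_py_alt (record : List (String × Option String)) : String :=
  pvJoinDC (record.map Prod.snd)

-- ===== PRECONDITION & SPEC =====
def Spec_stringify_query_py (record : List (String × Option String)) (out : String) : Prop := out = stringify_query_py_alt record
instance (record : List (String × Option String)) (out : String) : Decidable (Spec_stringify_query_py record out) := by unfold Spec_stringify_query_py; infer_instance

-- ===== CLAIM (what is proved, stated in full; the proofs are below) =====
def Claim_equal_stringify_query_py : Prop := ∀ (record : List (String × Option String)), Dom_stringify_query_py record → Spec_stringify_query_py record (stringify_query_py record)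

-- ===== LEMMAS AND PROOFS =====

-- a join headed by a nonempty kept string is nonempty
theorem pv_join_ne (t : String) (ht : t ≠ "") (ts : List String) :
    PySem.Str.join " " (t :: ts) ≠ "" := by
  cases ts with
  | nil =>
    intro h
    apply ht
    have := congrArg String.toList h
    simp [PySem.Str.toList_join, PySem.Chars.join_singleton] at this
    exact String.toList_inj.mp (by simpa using this)
  | cons r rs =>
    intro h
    have := congrArg String.toList h
    simp [PySem.Str.toList_join, PySem.Chars.join_cons_cons] at this

-- every string kept by the filter is nonempty
theorem pv_keep_ne (vs : List (Option String)) (t : String) (ht : t ∈ vs.filterMap pvKeep) :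
    t ≠ "" := by
  simp only [List.mem_filterMap] at ht
  obtain ⟨w, _, hw⟩ := ht
  cases w with
  | none => simp [pvKeep] at hw
  | some u =>
    by_cases hu : u = "" <;> simp [pvKeep, hu] at hw
    exact hw ▸ hu

theorem pv_join_nil : PySem.Str.join " " ([] : List String) = "" := by
  apply String.toList_inj.mp
  simp [PySem.Str.toList_join, PySem.Chars.join_nil]

-- joining a concatenation of two nonempty lists is joining the parts around one separator
theorem pv_chars_join_append (sep : List Char) (L1 L2 : List (List Char))
    (h1 : L1 ≠ []) (h2 : L2 ≠ []) :
    PySem.Chars.join sep (L1 ++ L2) = PySem.Chars.join sep L1 ++ sep ++ PySem.Chars.join sep L2 := by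
  induction L1 with
  | nil => exact absurd rfl h1
  | cons a L1 ih =>
    cases L1 with
    | nil =>
      cases L2 with
      | nil => exact absurd rfl h2
      | cons b L2 => simp [PySem.Chars.join_cons_cons, PySem.Chars.join_singleton]
    | cons c L1' =>
      have := ih (by simp)
      simp only [List.cons_append] at this ⊢
      rw [PySem.Chars.join_cons_cons, PySem.Chars.join_cons_cons]
      simp [this]

-- merging the joins of two filtered halves is the join of their concatenation
theorem pv_merge (L1 L2 : List String) (h1 : ∀ s ∈ L1, s ≠ "") (h2 : ∀ s ∈ L2, s ≠ "") :
    (if PySem.Str.join " " L1 = "" then PySem.Str.join " " L2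
     else if PySem.Str.join " " L2 = "" then PySem.Str.join " " L1
     else PySem.Str.join " " L1 ++ " " ++ PySem.Str.join " " L2)
      = PySem.Str.join " " (L1 ++ L2) := by
  cases L1 with
  | nil => simp [pv_join_nil]
  | cons t ts =>
    rw [if_neg (pv_join_ne t (h1 t (by simp)) ts)]
    cases L2 with
    | nil => simp [pv_join_nil]
    | cons r rs =>
      rw [if_neg (pv_join_ne r (h2 r (by simp)) rs)]
      apply String.toList_inj.mp
      simp only [PySem.Str.toList_join, String.toList_append, List.map_append]
      rw [pv_chars_join_append " ".toList (List.map String.toList (t :: ts))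
            (List.map String.toList (r :: rs)) (by simp) (by simp)]

-- pvJoinDC on the empty and singleton lists
theorem pv_joinDC_nil : pvJoinDC [] = PySem.Str.join " " (List.filterMap pvKeep []) := by
  simp [pvJoinDC, pv_join_nil]

theorem pv_joinDC_single (v : Option String) :
    pvJoinDC [v] = PySem.Str.join " " (List.filterMap pvKeep [v]) := by
  cases v with
  | none => simp [pvJoinDC, pvKeep, pv_join_nil]
  | some s =>
    by_cases hs : s = ""
    · simp [pvJoinDC, pvKeep, hs, pv_join_nil]
    · rw [show pvJoinDC [some s] = s from by simp [pvJoinDC, hs]]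
      rw [show ([some s] : List (Option String)).filterMap pvKeep = [s] from by simp [pvKeep, hs]]
      apply String.toList_inj.mp
      simp [PySem.Str.toList_join, PySem.Chars.join_singleton]

-- B's divide-and-conquer computes A's join of the filtered values (induction on a length bound)
theorem pv_joinDC_eq_aux (n : Nat) :
    ∀ vs : List (Option String), vs.length ≤ n →
      pvJoinDC vs = PySem.Str.join " " (vs.filterMap pvKeep) := by
  induction n with
  | zero =>
    intro vs h
    cases vs with
    | nil => exact pv_joinDC_nil
    | cons v vs => simp at h
  | succ n ih =>
    intro vs h
    match vs with
    | [] => exact pv_joinDC_nil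
    | [v] => exact pv_joinDC_single v
    | v1 :: v2 :: rest =>
      rw [pvJoinDC]
      rw [ih ((v1 :: v2 :: rest).take ((v1 :: v2 :: rest).length / 2)) (by simp at h ⊢; omega),
          ih ((v1 :: v2 :: rest).drop ((v1 :: v2 :: rest).length / 2)) (by simp at h ⊢; omega)]
      rw [pv_merge _ _ (fun s hs => pv_keep_ne _ s hs) (fun s hs => pv_keep_ne _ s hs)]
      rw [← List.filterMap_append, List.take_append_drop]

theorem pv_joinDC_eq (vs : List (Option String)) :
    pvJoinDC vs = PySem.Str.join " " (vs.filterMap pvKeep) :=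
  pv_joinDC_eq_aux vs.length vs (le_refl _)

-- ===== VERDICT (by name: the statement is the Claim_ definition above) =====
theorem stringify_query_py_spec : Claim_equal_stringify_query_py := by
  intro record _
  unfold Spec_stringify_query_py stringify_query_py stringify_query_py_alt
  rw [pv_joinDC_eq]
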